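-- pv_equiv track=rewrite | github.com/DiogoDores/advent-of-code-2020 | Day 9/solution.py | getWeakness
-- ===== SOURCE A (Python) =====
-- def getWeakness(preamble, code, n):
--     s = set()
--     for i in range(0, len(preamble)):
--         temp = n - preamble[i]
--         if temp in s:
--             newPreamble, newList = preamble[1:] + [n], code[1:]
--             return getWeakness(newPreamble, newList, code[code.index(n) + 1])
--         s.add(preamble[i])
--
--     return n
-- ===== SOURCE B (Python) =====
-- def getWeakness(preamble, code, n):
--     # Iterative single pass: an index pointer into code and a rolling window counter
--     # replace A's recursion, per-step list slicing and set rebuild.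
--     w = len(preamble)
--     buf = list(preamble)          # buf[lo:lo+w] is the current window
--     cnt = {}
--     for x in preamble:
--         cnt[x] = cnt.get(x, 0) + 1
--     cur = n
--     lo = 0
--     while True:
--         found = False
--         for i in range(lo, lo + w):
--             x = buf[i]
--             t = cur - x
--             if cnt.get(t, 0) > 0 and (t != x or cnt.get(x, 0) >= 2):
--                 found = True
--                 break
--         if not found:
--             return cur
--         nxt = code[code.index(cur, lo) + 1]
--         out = buf[lo]
--         cnt[out] -= 1
--         cnt[cur] = cnt.get(cur, 0) + 1
--         buf.append(cur)
--         lo += 1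
--         cur = nxt
-- ===== Notes on version B (the rewrite author's own statement) =====
-- stated objective: alternative
-- what changed: Replaces A's recursion (which re-slices preamble/code, rebuilds a set, and rescans code with code.index from the front at every step) by one iterative loop with index pointers into the original lists and a rolling occurrence counter for the window.
-- outside the precondition, e.g. on getWeakness([1, 2], [5, 3, 9], 3): A returns 9, B returns 9
import Mathlib
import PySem

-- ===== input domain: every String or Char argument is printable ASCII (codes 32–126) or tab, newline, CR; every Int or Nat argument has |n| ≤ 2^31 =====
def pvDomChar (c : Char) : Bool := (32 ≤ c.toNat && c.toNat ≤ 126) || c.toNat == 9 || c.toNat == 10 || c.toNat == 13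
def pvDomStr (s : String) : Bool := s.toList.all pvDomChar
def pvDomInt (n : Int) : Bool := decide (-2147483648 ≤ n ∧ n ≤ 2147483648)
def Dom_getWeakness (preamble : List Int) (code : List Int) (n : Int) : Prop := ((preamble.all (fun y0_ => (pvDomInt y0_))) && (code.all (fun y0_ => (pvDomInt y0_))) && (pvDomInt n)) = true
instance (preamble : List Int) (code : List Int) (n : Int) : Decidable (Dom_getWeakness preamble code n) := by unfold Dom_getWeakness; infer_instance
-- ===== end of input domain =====

-- B replaces A's recursion, per-step list slicing and per-step set rebuild by an iterative loop
-- with index pointers and a rolling window counter (equality proved on Pre_ below).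

-- ===== PORT A =====
-- A's inner loop: s = set(); for i in range(len(preamble)): temp = n - preamble[i]; if temp in s: → True; s.add(preamble[i])
def pvSumLoop (s : PySem.Set Int) (l : List Int) (n : Int) : Bool :=
  match l with
  | [] => false
  | x :: xs => if PySem.Set.contains s (n - x) then true else pvSumLoop (PySem.Set.add s x) xs n

def getWeakness (preamble : List Int) (code : List Int) (n : Int) : Int :=
  if pvSumLoop PySem.Set.empty preamble n then
    -- newPreamble, newList = preamble[1:] + [n], code[1:]
    -- return getWeakness(newPreamble, newList, code[code.index(n) + 1])
    match h : PySem.List.index? code n with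
    | none => 0   -- code.index(n) raises ValueError (outside Pre_)
    | some j =>
      match PySem.List.pyGet? code ((j : Int) + 1) with
      | none => 0 -- code[j+1] raises IndexError (outside Pre_)
      | some m =>
          getWeakness (PySem.List.slice preamble (some 1) none ++ [n])
                      (PySem.List.slice code (some 1) none) m
  else n
termination_by code.length
decreasing_by
  have hne : code ≠ [] := by
    intro hc
    subst hc
    simp [PySem.List.index?_eq_idxOf?] at h
  simp [PySem.List.slice_from_one]
  cases code with
  | nil => exact absurd rfl hne
  | cons a l => simp

-- ===== PORT B =====
-- cnt = {}; for x in preamble: cnt[x] = cnt.get(x, 0) + 1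
def pvCount (preamble : List Int) : PySem.Dict Int Int :=
  preamble.foldl (fun d x => d.insert x (d.getD x 0 + 1)) PySem.Dict.empty

-- for i in range(lo, lo + w): x = buf[i]; t = cur - x; if cnt.get(t,0) > 0 and (t != x or cnt.get(x,0) >= 2): found
-- (k counts the remaining iterations; buf.getD is exact: every reachable i is in range, lo + w ≤ len buf)
def pvScan (cnt : PySem.Dict Int Int) (buf : List Int) (cur : Int) (i : Nat) (k : Nat) : Bool :=
  match k with
  | 0 => false
  | k + 1 =>
    let x := buf.getD i 0
    let t := cur - x
    if 0 < cnt.getD t 0 ∧ (t ≠ x ∨ 2 ≤ cnt.getD x 0) then true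
    else pvScan cnt buf cur (i + 1) k

-- hand port of code.index(cur, lo): absolute index of the first occurrence at position ≥ lo
-- (none = ValueError); exact for the Nat lo B uses
def pvIndexFrom (code : List Int) (v : Int) (lo : Nat) : Option Nat :=
  (PySem.List.index? (code.drop lo) v).map (· + lo)

-- the 'while True' loop of B; buf[lo] is always in range when read (the window is nonempty there)
def pvLoopB (cnt : PySem.Dict Int Int) (buf : List Int) (w lo : Nat) (cur : Int)
    (code : List Int) : Int :=
  if pvScan cnt buf cur lo w then
    match h : pvIndexFrom code cur lo with
    | none => 0   -- code.index raises ValueError (outside Pre_)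
    | some j =>
      match h2 : PySem.List.pyGet? code ((j : Int) + 1) with
      | none => 0 -- code[j+1] raises IndexError (outside Pre_)
      | some nxt =>
        let out := buf.getD lo 0
        let cnt1 := cnt.insert out (cnt.getD out 0 - 1)
        pvLoopB (cnt1.insert cur (cnt1.getD cur 0 + 1)) (buf ++ [cur]) w (lo + 1) nxt code
  else cur
termination_by code.length - lo
decreasing_by
  have hj : lo ≤ j := by
    unfold pvIndexFrom at h
    rcases Option.map_eq_some_iff.mp h with ⟨r, _, hr⟩
    omega
  have hlt : (j : Int) + 1 < code.length := by
    have hnone := PySem.List.pyGet?_eq_none_iff (xs := code) (i := (j : Int) + 1)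
    by_cases hin : PySem.Raise.InRange code.length ((j : Int) + 1)
    · unfold PySem.Raise.InRange at hin
      omega
    · rw [← hnone] at hin
      simp [hin] at h2
  omega

def getWeakness_alt (preamble : List Int) (code : List Int) (n : Int) : Int :=
  let w := preamble.length
  let buf := preamble
  pvLoopB (pvCount preamble) buf w 0 n code

-- ===== PRECONDITION & SPEC =====
-- 'm is the sum of two entries of win at distinct positions' (the AoC window test)
def pvHasPair (win : List Int) (m : Int) : Prop :=
  ∃ x ∈ win, (m - x) ∈ win ∧ (m - x ≠ x ∨ 2 ≤ win.count x)

-- Pre_ excludes (a) inputs on which A raises (every scanned number stays a pair sum until code runs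
-- out: ValueError/IndexError), and (b) inputs with a window pair but n ≠ code[0], whose successor
-- chain comes from A's accidental code.index(n) scan: B behaves the same there, but equality is only
-- claimed (and proved) for the aligned chains the function is written for, a stated narrowing.
def Pre_getWeakness (preamble : List Int) (code : List Int) (n : Int) : Prop :=
  ¬ pvHasPair preamble n ∨
  (code.head? = some n ∧
    ∃ t < code.length, ¬ pvHasPair ((preamble ++ code.take t).drop t) (code.getD t 0))

instance (preamble : List Int) (code : List Int) (n : Int) : Decidable (Pre_getWeakness preamble code n) := by
  unfold Pre_getWeakness pvHasPair; infer_instance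

def pvWitness_getWeakness : List Int × List Int × Int := ([1, 2], [3, 5, 9], 3)

def Spec_getWeakness (preamble : List Int) (code : List Int) (n : Int) (out : Int) : Prop := out = getWeakness_alt preamble code n
instance (preamble : List Int) (code : List Int) (n : Int) (out : Int) : Decidable (Spec_getWeakness preamble code n out) := by unfold Spec_getWeakness; infer_instance

-- ===== CLAIM (what is proved, stated in full; the proofs are below) =====
def Claim_equal_getWeakness : Prop := ∀ (preamble : List Int) (code : List Int) (n : Int), Dom_getWeakness preamble code n → Pre_getWeakness preamble code n → Spec_getWeakness preamble code n (getWeakness preamble code n)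

-- ===== LEMMAS AND PROOFS =====

-- A's loop, characterised: some entry plus some strictly earlier entry sums to m
def pvFound (l : List Int) (m : Int) : Prop :=
  ∃ k < l.length, (m - l.getD k 0) ∈ l.take k

theorem pvSumLoop_iff (l : List Int) (s : PySem.Set Int) (m : Int) :
    pvSumLoop s l m = true ↔ ∃ k < l.length, ((m - l.getD k 0) ∈ s ∨ (m - l.getD k 0) ∈ l.take k) := by
  induction l generalizing s with
  | nil => simp [pvSumLoop]
  | cons x xs ih =>
    rw [pvSumLoop]
    by_cases hc : PySem.Set.contains s (m - x) = true
    · rw [if_pos hc]; simp only [true_iff]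
      exact ⟨0, by simp, Or.inl (by simpa using (PySem.Set.contains_iff s (m - x)).mp hc)⟩
    · rw [if_neg hc]
      rw [ih]
      constructor
      · rintro ⟨k, hk, hmem⟩
        refine ⟨k + 1, by simpa using hk, ?_⟩
        simp only [List.getD_cons_succ, List.take_succ_cons] at *
        rcases hmem with hs | ht
        · rcases (PySem.Set.mem_add _ _ _).mp hs with h | h
          · exact Or.inl h
          · exact Or.inr (List.mem_cons.mpr (Or.inl (by simpa using h)))
        · exact Or.inr (List.mem_cons_of_mem _ ht)
      · rintro ⟨k, hk, hmem⟩
        cases k with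
        | zero =>
          simp only [List.getD_cons_zero, List.take_zero] at hmem
          rcases hmem with hs | ht
          · exact absurd ((PySem.Set.contains_iff s (m - x)).mpr hs) hc
          · simp at ht
        | succ k =>
          refine ⟨k, by simpa using hk, ?_⟩
          simp only [List.getD_cons_succ, List.take_succ_cons] at hmem
          rcases hmem with hs | ht
          · exact Or.inl ((PySem.Set.mem_add _ _ _).mpr (Or.inl hs))
          · rcases List.mem_cons.mp ht with h | h
            · exact Or.inl ((PySem.Set.mem_add _ _ _).mpr (Or.inr h))
            · exact Or.inr h

theorem pvSumLoop_empty_iff (l : List Int) (m : Int) :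
    pvSumLoop PySem.Set.empty l m = true ↔ pvFound l m := by
  rw [pvSumLoop_iff]
  unfold pvFound
  simp [PySem.Set.empty]

theorem count_two_exists (l : List Int) (x : Int) (h : 2 ≤ l.count x) :
    ∃ k < l.length, l.getD k 0 = x ∧ x ∈ l.take k := by
  induction l with
  | nil => simp at h
  | cons a t ih =>
    by_cases hax : a = x
    · subst hax
      have hx : a ∈ t := by
        rw [List.count_cons_self] at h
        exact List.count_pos_iff.mp (by omega)
      rcases List.mem_iff_getElem.mp hx with ⟨k, hk, hget⟩
      refine ⟨k + 1, by simpa using hk, ?_, ?_⟩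
      · rw [List.getD_cons_succ, List.getD_eq_getElem t 0 hk]; exact hget
      · simp [List.take_succ_cons]
    · have h2 : 2 ≤ t.count x := by
        simp [hax] at h; omega
      rcases ih h2 with ⟨k, hk, hget, hmem⟩
      exact ⟨k + 1, by simpa using hk, by simpa using hget, by simp [List.take_succ_cons, hmem]⟩

theorem pvFound_iff_hasPair (l : List Int) (m : Int) :
    pvFound l m ↔ pvHasPair l m := by
  constructor
  · rintro ⟨k, hk, hmem⟩
    rw [List.getD_eq_getElem l 0 hk] at hmem
    refine ⟨l[k], List.getElem_mem hk, List.mem_of_mem_take hmem, ?_⟩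
    by_cases hne : m - l[k] ≠ l[k]
    · exact Or.inl hne
    · push Not at hne
      right
      obtain ⟨v, hv⟩ : ∃ v, l[k] = v := ⟨l[k], rfl⟩
      rw [hv] at hmem hne ⊢
      have hmem' : v ∈ l.take k := hne ▸ hmem
      have h1 : 0 < (l.take k).count v := List.count_pos_iff.mpr hmem'
      have hdl : 0 < (l.drop k).length := by simp [List.length_drop]; omega
      have hd0 : (l.drop k)[0] = v := by simpa [List.getElem_drop] using hv
      have h2 : 0 < (l.drop k).count v :=
        List.count_pos_iff.mpr (List.mem_iff_getElem.mpr ⟨0, hdl, hd0⟩)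
      have hsplit : l.count v = (l.take k).count v + (l.drop k).count v := by
        conv_lhs => rw [← List.take_append_drop k l]
        exact List.count_append ..
      omega
  · rintro ⟨x, hx, hy, hcase⟩
    by_cases hne : m - x = x
    · have h2 : 2 ≤ l.count x := by
        rcases hcase with h | h
        · exact absurd hne h
        · exact h
      rcases count_two_exists l x h2 with ⟨k, hk, hget, hmem⟩
      exact ⟨k, hk, by rw [hget, hne]; exact hmem⟩
    · rcases List.mem_iff_getElem.mp hx with ⟨i, hi, hgi⟩
      rcases List.mem_iff_getElem.mp hy with ⟨j, hj, hgj⟩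
      have hij : i ≠ j := by
        intro hh; subst hh
        exact hne (hgi.symm.trans hgj).symm
      rcases Nat.lt_or_ge i j with hlt | hge
      · refine ⟨j, hj, ?_⟩
        rw [List.getD_eq_getElem l 0 hj, hgj, show m - (m - x) = x by ring]
        exact List.mem_take_iff_getElem.mpr ⟨i, by omega, hgi⟩
      · have hlt : j < i := by omega
        refine ⟨i, hi, ?_⟩
        rw [List.getD_eq_getElem l 0 hi, hgi]
        exact List.mem_take_iff_getElem.mpr ⟨j, by omega, hgj⟩

theorem pvScan_iff (cnt : PySem.Dict Int Int) (buf : List Int) (cur : Int) :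
    ∀ (k i : Nat), i + k ≤ buf.length →
      (pvScan cnt buf cur i k = true ↔
        ∃ x ∈ (buf.drop i).take k, 0 < cnt.getD (cur - x) 0 ∧ (cur - x ≠ x ∨ 2 ≤ cnt.getD x 0)) := by
  intro k
  induction k with
  | zero => intro i _; simp [pvScan]
  | succ k ih =>
    intro i hle
    have hi : i < buf.length := by omega
    have hdrop : buf.drop i = buf[i] :: buf.drop (i + 1) := List.drop_eq_getElem_cons hi
    have hgd : buf.getD i 0 = buf[i] := List.getD_eq_getElem buf 0 hi
    rw [pvScan]
    simp only [hgd]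
    by_cases hcond : 0 < cnt.getD (cur - buf[i]) 0 ∧ (cur - buf[i] ≠ buf[i] ∨ 2 ≤ cnt.getD buf[i] 0)
    · rw [if_pos hcond]
      simp only [true_iff]
      exact ⟨buf[i], by rw [hdrop, List.take_succ_cons]; exact List.mem_cons_self, hcond⟩
    · rw [if_neg hcond, ih (i + 1) (by omega)]
      rw [hdrop, List.take_succ_cons]
      constructor
      · rintro ⟨x, hx, hc⟩
        exact ⟨x, List.mem_cons_of_mem _ hx, hc⟩
      · rintro ⟨x, hx, hc⟩
        rcases List.mem_cons.mp hx with rfl | hx'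
        · exact absurd hc hcond
        · exact ⟨x, hx', hc⟩

theorem pvScan_hasPair (cnt : PySem.Dict Int Int) (buf : List Int) (cur : Int)
    (win : List Int) (pos : Nat)
    (hI : ∀ x, cnt.getD x 0 = (win.count x : Int))
    (hwin : (buf.drop pos).take win.length = win)
    (hle : pos + win.length ≤ buf.length) :
    (pvScan cnt buf cur pos win.length = true ↔ pvHasPair win cur) := by
  rw [pvScan_iff cnt buf cur win.length pos hle, hwin]
  unfold pvHasPair
  constructor
  · rintro ⟨x, hx, h1, h2⟩
    rw [hI] at h1
    refine ⟨x, hx, List.count_pos_iff.mp (by exact_mod_cast h1), ?_⟩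
    rcases h2 with h | h
    · exact Or.inl h
    · exact Or.inr (by rw [hI] at h; exact_mod_cast h)
  · rintro ⟨x, hx, h1, h2⟩
    refine ⟨x, hx, by rw [hI]; exact_mod_cast List.count_pos_iff.mpr h1, ?_⟩
    rcases h2 with h | h
    · exact Or.inl h
    · exact Or.inr (by rw [hI]; exact_mod_cast h)

theorem counter_step (cnt : PySem.Dict Int Int) (out cur : Int) (rest : List Int)
    (hI : ∀ x, cnt.getD x 0 = ((out :: rest).count x : Int)) :
    ∀ x, ((cnt.insert out (cnt.getD out 0 - 1)).insert cur
            ((cnt.insert out (cnt.getD out 0 - 1)).getD cur 0 + 1)).getD x 0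
          = ((rest ++ [cur]).count x : Int) := by
  intro x
  have hx := hI x
  have hout := hI out
  have hcur := hI cur
  simp only [PySem.Dict.getD_insert, List.count_append, List.count_cons,
    List.count_nil, beq_iff_eq] at *
  by_cases h1 : x = cur <;> by_cases h2 : cur = out <;> by_cases h3 : x = out <;>
    simp only [h1, h2, h3, if_true, if_false] <;>
    (try rw [if_neg (by omega)]) <;> push_cast at * <;> omega

theorem pvSumLoop_hasPair (l : List Int) (m : Int) :
    pvSumLoop PySem.Set.empty l m = true ↔ pvHasPair l m :=
  (pvSumLoop_empty_iff l m).trans (pvFound_iff_hasPair l m)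

theorem pvMain : ∀ (codeRem preamble : List Int) (n : Int) (cnt : PySem.Dict Int Int)
    (buf : List Int) (lo : Nat) (code0 : List Int),
    code0.drop lo = codeRem →
    lo ≤ buf.length →
    codeRem.head? = some n →
    (∀ x, cnt.getD x 0 = (preamble.count x : Int)) →
    buf.drop lo = preamble →
    (∃ t < codeRem.length, ¬ pvHasPair ((preamble ++ codeRem.take t).drop t) (codeRem.getD t 0)) →
    getWeakness preamble codeRem n = pvLoopB cnt buf preamble.length lo n code0 := by
  intro codeRem
  induction codeRem with
  | nil => intro pre n cnt buf lo code0 _ _ hh _ _ _; simp at hh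
  | cons a code' ih =>
    intro pre n cnt buf lo code0 hc0 hlo hh hI hbuf hex
    obtain rfl : a = n := by simpa using hh
    have hblen : buf.length = lo + pre.length := by
      have := congrArg List.length hbuf
      simp [List.length_drop] at this
      omega
    have hwin : (buf.drop lo).take pre.length = pre := by
      rw [hbuf]; exact List.take_of_length_le (le_refl _)
    have hscan := pvScan_hasPair cnt buf a pre lo hI hwin (by omega)
    rw [pvLoopB]
    by_cases hfound : pvHasPair pre a
    · -- the window has a pair: both sides advance
      obtain ⟨t, ht, hnp⟩ := hex
      have ht0 : t ≠ 0 := by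
        intro h0; subst h0; simp at hnp; exact hnp hfound
      cases code' with
      | nil => simp at ht; omega
      | cons m code'' =>
        cases pre with
        | nil => exact absurd hfound (by rintro ⟨x, hx, -⟩; simp at hx)
        | cons p0 prest =>
          simp only [List.length_cons] at hblen
          -- A takes one step
          rw [getWeakness]
          rw [if_pos ((pvSumLoop_hasPair ..).mpr hfound)]
          split
          next heq => rw [PySem.List.index?_cons_self] at heq; cases heq
          next j heq =>
          rw [PySem.List.index?_cons_self] at heq
          injection heq with hj
          subst hj
          have hget2 : PySem.List.pyGet? (a :: m :: code'') (((0 : Nat) : Int) + 1) = some m := by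
            simp
          simp only [hget2]
          -- B takes one step
          rw [if_pos (hscan.mpr hfound)]
          have hidx : pvIndexFrom code0 a lo = some lo := by
            unfold pvIndexFrom
            rw [hc0, PySem.List.index?_cons_self]
            simp
          have hgetB : PySem.List.pyGet? code0 ((lo : Int) + 1) = some m := by
            have h1 : code0[lo + 1]? = some m := by
              have := congrArg (fun l => l[1]?) hc0
              simpa [List.getElem?_drop] using this
            have h2 : ((lo : Int) + 1) = ((lo + 1 : Nat) : Int) := by push_cast; ring
            rw [h2, PySem.List.pyGet?_natCast, h1]
          split
          next heq2 => rw [hidx] at heq2; cases heq2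
          next j2 heq2 =>
          rw [hidx] at heq2
          injection heq2 with hj2
          subst hj2
          split
          next heq3 => rw [hgetB] at heq3; cases heq3
          next nxt heq3 =>
          rw [hgetB] at heq3
          injection heq3 with hnxt
          subst hnxt
          -- buf[lo] is the head of the window
          have hout : buf.getD lo 0 = p0 := by
            have h0 := congrArg (fun l => l[0]?) hbuf
            simp only [List.getElem?_drop] at h0
            simp only [List.getD, Nat.add_zero] at *
            simp [h0]
          rw [hout]
          -- the recursive call
          have hI' := counter_step cnt p0 a prest (by simpa using hI)
          have hbuf' : (buf ++ [a]).drop (lo + 1) = prest ++ [a] := by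
            rw [List.drop_append_of_le_length (show lo + 1 ≤ buf.length by omega), ← List.tail_drop, hbuf]
            simp
          have hc0' : code0.drop (lo + 1) = m :: code'' := by
            rw [← List.tail_drop, hc0]; simp
          have hex' : ∃ t' < (m :: code'').length,
              ¬ pvHasPair (((prest ++ [a]) ++ (m :: code'').take t').drop t')
                ((m :: code'').getD t' 0) := by
            refine ⟨t - 1, by simp at ht ⊢; omega, ?_⟩
            obtain ⟨t', rfl⟩ : ∃ t', t = t' + 1 := ⟨t - 1, by omega⟩
            simpa [List.drop_succ_cons, List.append_assoc] using hnp
          have hrec := ih (prest ++ [a]) m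
            ((cnt.insert p0 (cnt.getD p0 0 - 1)).insert a
              ((cnt.insert p0 (cnt.getD p0 0 - 1)).getD a 0 + 1))
            (buf ++ [a]) (lo + 1) code0 hc0' (by simp; omega) (by simp) hI' hbuf' hex'
          simpa [PySem.List.slice_from_one] using hrec
    · -- no pair: both sides return n
      rw [getWeakness]
      rw [if_neg (by rw [pvSumLoop_hasPair]; exact hfound)]
      rw [if_neg (by rw [hscan]; exact hfound)]

-- ===== VERDICT (by name: the statement is the Claim_ definition above) =====
theorem getWeakness_spec : Claim_equal_getWeakness := by
  intro p c n _ hpre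
  unfold Spec_getWeakness
  have hI : ∀ x, (pvCount p).getD x 0 = (p.count x : Int) := by
    intro x
    rw [pvCount, PySem.Dict.foldl_insert_getD_add_one_eq_counter, PySem.Dict.getD_counter]
  rcases hpre with hnp | ⟨hh, hex⟩
  · -- no pair in the initial window: both return n immediately
    unfold getWeakness_alt
    rw [getWeakness]
    rw [if_neg (by rw [pvSumLoop_hasPair]; exact hnp)]
    rw [pvLoopB]
    have hwin : ((p.drop 0).take p.length) = p := by simp
    rw [if_neg (by
      rw [pvScan_hasPair (pvCount p) p n p 0 hI hwin (by simp)]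
      exact hnp)]
  · -- aligned chain: the main induction
    unfold getWeakness_alt
    exact pvMain c p n (pvCount p) p 0 c rfl (by simp) hh hI rfl hex
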